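-- pv_equiv track=rewrite | github.com/anetczuk/mdlinkscheck | src/mdlinkscheck/filechecker.py | convert_header_to_bitbucket_target
-- ===== SOURCE A (Python) =====
-- def convert_header_to_bitbucket_target(header_label):
--     # bitbucket adds prefix to all section elements
--     target = header_label.lower()
--     target = target.replace(" ", "-")
--     target = target.replace(",", "")
--     target = target.replace(".", "")
--     target = target.replace("(", "")
--     target = target.replace(")", "")
--
--     # reduce dashes
--     while True:
--         new_target = target.replace("--", "-")
--         if new_target == target:
--             # no progress - break
--             break
--         target = new_target
--
--     return f"markdown-header-{target}"
-- ===== SOURCE B (Python) =====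
-- def convert_header_to_bitbucket_target(header_label):
--     # single linear pass: skip punctuation, collapse space/dash runs into one
--     # dash, lower-case the rest
--     out = []
--     prev_dash = False
--     for ch in header_label:
--         if ch in ",.()":
--             continue
--         if ch == " " or ch == "-":
--             if not prev_dash:
--                 out.append("-")
--                 prev_dash = True
--         else:
--             out.append(ch.lower())
--             prev_dash = False
--     return "markdown-header-" + "".join(out)
-- ===== Notes on version B (the rewrite author's own statement) =====
-- stated objective: alternative
-- what changed: Replaced A's six whole-string replace passes plus a repeat-until-fixpoint dash-collapse loop by a single left-to-right pass that skips punctuation, lower-cases kept characters and emits at most one dash per space/dash run, tracked by a previous-was-dash flag.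
import Mathlib
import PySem

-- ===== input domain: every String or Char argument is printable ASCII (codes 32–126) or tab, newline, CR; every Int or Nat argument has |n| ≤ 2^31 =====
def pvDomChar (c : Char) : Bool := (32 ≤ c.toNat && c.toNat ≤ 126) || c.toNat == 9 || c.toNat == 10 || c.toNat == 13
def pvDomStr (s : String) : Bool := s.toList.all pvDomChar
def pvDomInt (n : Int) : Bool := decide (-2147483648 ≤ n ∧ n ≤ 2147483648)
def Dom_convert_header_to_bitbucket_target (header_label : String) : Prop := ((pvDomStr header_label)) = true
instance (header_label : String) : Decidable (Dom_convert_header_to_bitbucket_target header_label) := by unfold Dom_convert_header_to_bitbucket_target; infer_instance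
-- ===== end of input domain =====

-- B replaces A's chain of whole-string replaces plus a fixpoint dash-collapse loop by one
-- linear pass with a previous-was-dash flag (objective: alternative, same observable result).

-- ===== PORT A =====
-- One pass of target.replace("--", "-") as a structural recursion: used only to justify
-- termination of the while-loop port below (the port itself calls PySem.Chars.replace).
def pvH : List Char → List Char
  | [] => []
  | [c] => [c]
  | c :: c' :: t => if c = '-' ∧ c' = '-' then '-' :: pvH t else c :: pvH (c' :: t)

lemma pvGo_eq_pvH : ∀ (fuel : Nat) (l acc : List Char), l.length ≤ fuel →
    PySem.Chars.replace.go ['-','-'] ['-'] fuel l acc = acc.reverse ++ pvH l := by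
  intro fuel
  induction fuel with
  | zero =>
    intro l acc h
    match l with
    | [] => simp [PySem.Chars.replace.go, pvH]
    | c :: t => simp at h
  | succ n ih =>
    intro l acc h
    match l with
    | [] => simp [PySem.Chars.replace.go, pvH]
    | [c] =>
      rw [PySem.Chars.replace.go]
      have hpre : (['-','-'] : List Char).isPrefixOf [c] = false := by
        simp [List.isPrefixOf]
      rw [hpre]
      simp only [Bool.false_eq_true, if_false]
      rw [ih [] (c :: acc) (by simp)]
      simp [pvH]
    | c :: c' :: t =>
      rw [PySem.Chars.replace.go]
      by_cases hd : c = '-' ∧ c' = '-'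
      · obtain ⟨rfl, rfl⟩ := hd
        have hpre : (['-','-'] : List Char).isPrefixOf ('-' :: '-' :: t) = true := by
          simp [List.isPrefixOf]
        rw [hpre]
        simp only [if_true]
        rw [ih _ _ (by simp at h ⊢; omega)]
        simp [pvH]
      · have hpre : (['-','-'] : List Char).isPrefixOf (c :: c' :: t) = false := by
          simp [List.isPrefixOf]; tauto
        rw [hpre]
        simp only [Bool.false_eq_true, if_false]
        rw [ih (c' :: t) (c :: acc) (by simp at h ⊢; omega)]
        simp [pvH, hd]

lemma pvReplace_eq_pvH (l : List Char) :
    PySem.Chars.replace l ['-','-'] ['-'] = pvH l := by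
  rw [PySem.Chars.replace]
  simp only [List.isEmpty_cons, Bool.false_eq_true, if_false]
  rw [pvGo_eq_pvH l.length l [] le_rfl]
  simp

lemma pvH_len : ∀ l : List Char, (pvH l).length ≤ l.length := by
  intro l
  fun_induction pvH l with
  | case1 => simp
  | case2 c => simp
  | case3 c c' t hd ih => simp; omega
  | case4 c c' t hd ih => simp; simpa using ih

lemma pvH_eq_or_lt : ∀ l : List Char, pvH l = l ∨ (pvH l).length < l.length := by
  intro l
  fun_induction pvH l with
  | case1 => left; rfl
  | case2 c => left; rfl
  | case3 c c' t hd ih =>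
    right
    have := pvH_len t
    simp; omega
  | case4 c c' t hd ih =>
    rcases ih with h | h
    · left; rw [h]
    · right; simp at h ⊢; omega

-- the 'while True: … replace("--","-") …' loop of A, on the code points
def pvReduceDashes (target : List Char) : List Char :=
  let new_target := PySem.Chars.replace target ['-','-'] ['-']
  if new_target = target then target else pvReduceDashes new_target
termination_by target.length
decreasing_by
  rename_i hne
  rcases pvH_eq_or_lt target with h | h
  · exact absurd ((pvReplace_eq_pvH target).trans h) hne
  · exact lt_of_eq_of_lt (congrArg List.length (pvReplace_eq_pvH target)) h

def convert_header_to_bitbucket_target (header_label : String) : String :=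
  let target := PySem.Str.lower header_label
  let target := PySem.Str.replace target " " "-"
  let target := PySem.Str.replace target "," ""
  let target := PySem.Str.replace target "." ""
  let target := PySem.Str.replace target "(" ""
  let target := PySem.Str.replace target ")" ""
  let target := String.ofList (pvReduceDashes target.toList)
  String.ofList ("markdown-header-".toList ++ target.toList)

-- ===== PORT B =====
def pvStepB (st : List Char × Bool) (ch : Char) : List Char × Bool :=
  if ch ∈ [',', '.', '(', ')'] then st
  else if ch = ' ' ∨ ch = '-' then
    if st.2 then st else (st.1 ++ ['-'], true)
  else (st.1 ++ [PySem.Chars.lowerChar ch], false)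

def convert_header_to_bitbucket_target_alt (header_label : String) : String :=
  let st := header_label.toList.foldl pvStepB ([], false)
  String.ofList ("markdown-header-".toList ++ st.1)

-- ===== PRECONDITION & SPEC =====
def Spec_convert_header_to_bitbucket_target (header_label : String) (out : String) : Prop := out = convert_header_to_bitbucket_target_alt header_label
instance (header_label : String) (out : String) : Decidable (Spec_convert_header_to_bitbucket_target header_label out) := by unfold Spec_convert_header_to_bitbucket_target; infer_instance

-- ===== CLAIM (what is proved, stated in full; the proofs are below) =====
def Claim_equal_convert_header_to_bitbucket_target : Prop := ∀ (header_label : String), Dom_convert_header_to_bitbucket_target header_label → Spec_convert_header_to_bitbucket_target header_label (convert_header_to_bitbucket_target header_label)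

-- ===== LEMMAS AND PROOFS =====

-- squeeze runs of dashes, tracking whether the previous kept char was a dash
def pvSq (pd : Bool) : List Char → List Char
  | [] => []
  | c :: t => if c = '-' then (if pd then pvSq true t else '-' :: pvSq true t) else c :: pvSq false t

lemma pvSq_pvH (l : List Char) : ∀ pd, pvSq pd (pvH l) = pvSq pd l := by
  fun_induction pvH l with
  | case1 => intro pd; rfl
  | case2 c => intro pd; rfl
  | case3 c c' t hd ih =>
    intro pd
    obtain ⟨rfl, rfl⟩ := hd
    cases pd <;> simp [pvSq, ih]
  | case4 c c' t hd ih =>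
    intro pd
    by_cases hc : c = '-'
    · subst hc
      have hc' : c' ≠ '-' := by tauto
      cases pd <;> simp [pvSq, ih, hc']
    · simp [pvSq, hc, ih]

lemma pvH_fix_sq (l : List Char) : pvH l = l → pvSq false l = l := by
  fun_induction pvH l with
  | case1 => intro _; rfl
  | case2 c => intro _; by_cases hc : c = '-' <;> simp [pvSq, hc]
  | case3 c c' t hd ih =>
    intro h
    obtain ⟨rfl, rfl⟩ := hd
    exfalso
    have := congrArg List.length h
    have := pvH_len t
    simp at *; omega
  | case4 c c' t hd ih =>
    intro h
    simp only [List.cons.injEq] at h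
    have ht := ih h.2
    by_cases hc : c = '-'
    · subst hc
      have hc' : c' ≠ '-' := by tauto
      simp [pvSq, hc'] at ht ⊢
      exact ht
    · have h1 : pvSq false (c :: c' :: t) = c :: pvSq false (c' :: t) := by simp [pvSq, hc]
      rw [h1, ht]

lemma pvReduce_eq_sq (l : List Char) : pvReduceDashes l = pvSq false l := by
  fun_induction pvReduceDashes l with
  | case1 l nt hc =>
    have hnt : nt = pvH l := pvReplace_eq_pvH l
    rw [hnt] at hc
    exact (pvH_fix_sq l hc).symm
  | case2 l nt hc ih =>
    have hnt : nt = pvH l := pvReplace_eq_pvH l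
    rw [ih, hnt, pvSq_pvH]

-- one pass of s.replace(c, d) / s.replace(c, "") for single characters
lemma pvGo_map (c d : Char) : ∀ (fuel : Nat) (l acc : List Char), l.length ≤ fuel →
    PySem.Chars.replace.go [c] [d] fuel l acc
      = acc.reverse ++ l.map (fun x => if x = c then d else x) := by
  intro fuel
  induction fuel with
  | zero =>
    intro l acc h
    match l with
    | [] => simp [PySem.Chars.replace.go]
    | x :: t => simp at h
  | succ n ih =>
    intro l acc h
    match l with
    | [] => simp [PySem.Chars.replace.go]
    | x :: t =>
      rw [PySem.Chars.replace.go]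
      by_cases hx : x = c
      · subst hx
        have hpre : ([x] : List Char).isPrefixOf (x :: t) = true := by
          simp [List.isPrefixOf]
        rw [hpre]
        simp only [if_true]
        rw [show List.drop [x].length (x :: t) = t from rfl,
            show ([d].reverse ++ acc) = d :: acc from rfl]
        rw [ih t (d :: acc) (by simp at h ⊢; omega)]
        simp
      · have hpre : ([c] : List Char).isPrefixOf (x :: t) = false := by
          simp [List.isPrefixOf]; intro hcx; exact absurd hcx.symm hx
        rw [hpre]
        simp only [Bool.false_eq_true, if_false]
        rw [ih t (x :: acc) (by simp at h ⊢; omega)]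
        simp [hx]

lemma pvGo_del (c : Char) : ∀ (fuel : Nat) (l acc : List Char), l.length ≤ fuel →
    PySem.Chars.replace.go [c] [] fuel l acc
      = acc.reverse ++ l.filter (fun x => !(x == c)) := by
  intro fuel
  induction fuel with
  | zero =>
    intro l acc h
    match l with
    | [] => simp [PySem.Chars.replace.go]
    | x :: t => simp at h
  | succ n ih =>
    intro l acc h
    match l with
    | [] => simp [PySem.Chars.replace.go]
    | x :: t =>
      rw [PySem.Chars.replace.go]
      by_cases hx : x = c
      · subst hx
        have hpre : ([x] : List Char).isPrefixOf (x :: t) = true := by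
          simp [List.isPrefixOf]
        rw [hpre]
        simp only [if_true]
        rw [show List.drop [x].length (x :: t) = t from rfl,
            show (([] : List Char).reverse ++ acc) = acc from rfl]
        rw [ih t acc (by simp at h ⊢; omega)]
        simp
      · have hpre : ([c] : List Char).isPrefixOf (x :: t) = false := by
          simp [List.isPrefixOf]; intro hcx; exact absurd hcx.symm hx
        rw [hpre]
        simp only [Bool.false_eq_true, if_false]
        rw [ih t (x :: acc) (by simp at h ⊢; omega)]
        simp [hx]

lemma pvReplace_map (l : List Char) (c d : Char) :
    PySem.Chars.replace l [c] [d] = l.map (fun x => if x = c then d else x) := by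
  rw [PySem.Chars.replace]
  simp only [List.isEmpty_cons, Bool.false_eq_true, if_false]
  rw [pvGo_map c d l.length l [] le_rfl]
  simp

lemma pvReplace_del (l : List Char) (c : Char) :
    PySem.Chars.replace l [c] [] = l.filter (fun x => !(x == c)) := by
  rw [PySem.Chars.replace]
  simp only [List.isEmpty_cons, Bool.false_eq_true, if_false]
  rw [pvGo_del c l.length l [] le_rfl]
  simp

-- B's loop body, as a plain recursion over the input
def pvComb (pd : Bool) : List Char → List Char
  | [] => []
  | c :: t =>
    if c ∈ [',', '.', '(', ')'] then pvComb pd t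
    else if c = ' ' ∨ c = '-' then
      if pd then pvComb pd t else '-' :: pvComb true t
    else PySem.Chars.lowerChar c :: pvComb false t

lemma pvFoldB : ∀ (l out : List Char) (pd : Bool),
    (l.foldl pvStepB (out, pd)).1 = out ++ pvComb pd l := by
  intro l
  induction l with
  | nil => intro out pd; simp [pvComb]
  | cons c t ih =>
    intro out pd
    simp only [List.foldl_cons]
    by_cases h1 : c ∈ [',', '.', '(', ')']
    · simp only [pvStepB, if_pos h1, pvComb]
      rw [ih out pd]
    · by_cases h2 : c = ' ' ∨ c = '-'
      · cases pd with
        | true =>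
          simp only [pvStepB, if_neg h1, if_pos h2, pvComb]
          simp only [if_true]
          rw [ih out true]
        | false =>
          simp only [pvStepB, if_neg h1, if_pos h2, pvComb]
          simp only [Bool.false_eq_true, if_false]
          rw [ih (out ++ ['-']) true]
          simp
      · simp only [pvStepB, if_neg h1, if_neg h2, pvComb]
        rw [ih (out ++ [PySem.Chars.lowerChar c]) false]
        simp

lemma pvLower_low (c d : Char) (hd : d.toNat < 65) :
    PySem.Chars.lowerChar c = d ↔ c = d := by
  unfold PySem.Chars.lowerChar PySem.Chars.isupper
  split
  · rename_i h
    simp only [Bool.and_eq_true, decide_eq_true_eq] at h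
    obtain ⟨h1, h2⟩ := h
    rw [Char.le_def] at h1 h2
    have hc1 : 65 ≤ c.toNat := h1
    have hc2 : c.toNat ≤ 90 := h2
    have hval : (Char.ofNat (c.toNat + 32)).toNat = c.toNat + 32 := by
      have hv : Nat.isValidChar (c.toNat + 32) := Or.inl (by omega)
      rw [Char.toNat_ofNat, if_pos hv]
    constructor
    · intro he
      exfalso
      have := congrArg Char.toNat he
      rw [hval] at this
      omega
    · intro he
      exfalso
      have := congrArg Char.toNat he
      omega
  · exact Iff.rfl

-- the composite of A's lower / space→dash / four deletions, applied to a list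
def pvChainA (l : List Char) : List Char :=
  (((((PySem.Chars.lower l).map (fun x => if x = ' ' then '-' else x)).filter
      (fun x => !(x == ','))).filter (fun x => !(x == '.'))).filter
      (fun x => !(x == '('))).filter (fun x => !(x == ')'))

lemma pvBridge : ∀ (l : List Char) (pd : Bool), pvSq pd (pvChainA l) = pvComb pd l := by
  intro l
  induction l with
  | nil => intro pd; rfl
  | cons c t ih =>
    intro pd
    by_cases h1 : c ∈ [',', '.', '(', ')']
    · have hc : pvComb pd (c :: t) = pvComb pd t := by
        simp only [pvComb, if_pos h1]
      rw [hc, ← ih pd]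
      congr 1
      fin_cases h1 <;> (simp [pvChainA, PySem.Chars.lower, PySem.Chars.lowerChar, PySem.Chars.isupper])
    · by_cases h2 : c = ' ' ∨ c = '-'
      · have hchain : pvChainA (c :: t) = '-' :: pvChainA t := by
          rcases h2 with h | h <;> (subst h; simp [pvChainA, PySem.Chars.lower, PySem.Chars.lowerChar, PySem.Chars.isupper])
        rw [hchain]
        cases pd with
        | true =>
          have : pvSq true ('-' :: pvChainA t) = pvSq true (pvChainA t) := by simp [pvSq]
          rw [this, ih true]
          simp [pvComb, h1, h2]
        | false =>
          have : pvSq false ('-' :: pvChainA t) = '-' :: pvSq true (pvChainA t) := by simp [pvSq]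
          rw [this, ih true]
          simp only [pvComb, if_neg h1, if_pos h2]
          simp
      · have hns : c ≠ ' ' ∧ c ≠ '-' := by tauto
        have hnd : c ≠ ',' ∧ c ≠ '.' ∧ c ≠ '(' ∧ c ≠ ')' := by simp at h1; tauto
        have e1 : PySem.Chars.lowerChar c ≠ ' ' := by rw [ne_eq, pvLower_low c ' ' (by decide)]; exact hns.1
        have e2 : PySem.Chars.lowerChar c ≠ '-' := by rw [ne_eq, pvLower_low c '-' (by decide)]; exact hns.2
        have e3 : PySem.Chars.lowerChar c ≠ ',' := by rw [ne_eq, pvLower_low c ',' (by decide)]; exact hnd.1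
        have e4 : PySem.Chars.lowerChar c ≠ '.' := by rw [ne_eq, pvLower_low c '.' (by decide)]; exact hnd.2.1
        have e5 : PySem.Chars.lowerChar c ≠ '(' := by rw [ne_eq, pvLower_low c '(' (by decide)]; exact hnd.2.2.1
        have e6 : PySem.Chars.lowerChar c ≠ ')' := by rw [ne_eq, pvLower_low c ')' (by decide)]; exact hnd.2.2.2
        have hchain : pvChainA (c :: t) = PySem.Chars.lowerChar c :: pvChainA t := by
          simp [pvChainA, PySem.Chars.lower, e1, e3, e4, e5, e6]
        rw [hchain]
        have : pvSq pd (PySem.Chars.lowerChar c :: pvChainA t)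
            = PySem.Chars.lowerChar c :: pvSq false (pvChainA t) := by simp [pvSq, e2]
        rw [this, ih false]
        simp only [pvComb, if_neg h1, if_neg h2]

-- A's replace chain, read off on the list side
lemma pvChain_eq (s : String) :
    (PySem.Str.replace (PySem.Str.replace (PySem.Str.replace (PySem.Str.replace
      (PySem.Str.replace (PySem.Str.lower s) " " "-") "," "") "." "") "(" "") ")" "").toList
    = pvChainA s.toList := by
  simp only [PySem.Str.replace, PySem.Str.lower, String.toList_ofList]
  simp only [pvChainA]
  rw [show (" ".toList) = [' '] from rfl, show ("-".toList) = ['-'] from rfl,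
      show (",".toList) = [','] from rfl, show (".".toList) = ['.'] from rfl,
      show ("(".toList) = ['('] from rfl, show (")".toList) = [')'] from rfl,
      show ("".toList) = ([] : List Char) from rfl]
  rw [pvReplace_map, pvReplace_del, pvReplace_del, pvReplace_del, pvReplace_del]

-- ===== VERDICT (by name: the statement is the Claim_ definition above) =====
theorem convert_header_to_bitbucket_target_spec : Claim_equal_convert_header_to_bitbucket_target := by
  intro s _
  unfold Spec_convert_header_to_bitbucket_target
  unfold convert_header_to_bitbucket_target convert_header_to_bitbucket_target_alt
  simp only [String.toList_ofList]
  congr 1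
  rw [pvChain_eq, pvFoldB, pvReduce_eq_sq, pvBridge]
  simp
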